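-- pv_equiv track=rewrite | github.com/IHateChem/Algo_practice | 프로그래머스/lv4/60060. 가사 검색/가사 검색.py | solution
-- ===== SOURCE A (Python) =====
-- from collections import defaultdict as df
--
-- def solution(words, queries):
--     TrieS = Node()
--     answer = []
--     TrieR = Node()
--     for word in words:
--         subTrieS = TrieS
--         subTrieR = TrieR
--         n = len(word)
--         for i in range(n):
--             subTrieS = subTrieS.addNext(word[i], n)
--             subTrieR = subTrieR.addNext(word[n-i-1], n)
--     for query in queries:
--         if query[0] != "?":
--             subTrie = TrieS
--         else:
--             subTrie = TrieR
--             query = query[::-1]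
--         flag = True
--         n = len(query)
--         for q in query:
--             if q == "?":
--                 answer.append(subTrie.lengths[n])
--                 flag = False
--                 break
--             subTrie = subTrie.find(q)
--             if not subTrie:
--                 answer.append(0)
--                 flag = False
--                 break
--         if flag: answer.append(1)
--     return answer
--
-- class Node:
--     def __init__(self):
--         self.lengths = df(int)
--         self.next = {}
--     def addNext(self, v, length):
--         self.lengths[length] += 1
--         n = self.next.get(v)
--         if n:
--             return n
--         else:
--             node = Node()
--             self.next[v] = node
--             return node
--     def find(self, v):
--         return self.next.get(v)
-- ===== SOURCE B (Python) =====
-- def solution(words, queries):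
--     # Per-query direct scan: no trie.  A query's fixed part before its first '?'
--     # (reversed suffix for leading-'?' queries) is matched as a prefix; a query
--     # without '?' answers 1 iff it is a prefix of some word (matching A).
--     def answer(q):
--         if '?' not in q:
--             return 1 if any(w.startswith(q) for w in words) else 0
--         if q[0] != '?':
--             p = q[:q.index('?')]
--             return sum(1 for w in words if len(w) == len(q) and w.startswith(p))
--         r = q[::-1]
--         p = r[:r.index('?')]
--         return sum(1 for w in words if len(w) == len(q) and w[::-1].startswith(p))
--     return [answer(q) for q in queries]
-- ===== Notes on version B (the rewrite author's own statement) =====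
-- stated objective: simpler
-- what changed: Replaces A's pair of mutable tries (forward and reversed, with per-node length counters) by a direct per-query scan: count words of the query's length whose prefix (or reversed suffix) matches the fixed part before the first '?', and for wildcard-free queries report whether the query is a prefix of some word.
-- crash fix: A raises IndexError (query[0]) when some query is the empty string; B returns 1 there iff some word exists (every word has the empty prefix), 0 otherwise. — e.g. on solution(["a"], [""]): A raises IndexError, B returns [1]
import Mathlib
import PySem

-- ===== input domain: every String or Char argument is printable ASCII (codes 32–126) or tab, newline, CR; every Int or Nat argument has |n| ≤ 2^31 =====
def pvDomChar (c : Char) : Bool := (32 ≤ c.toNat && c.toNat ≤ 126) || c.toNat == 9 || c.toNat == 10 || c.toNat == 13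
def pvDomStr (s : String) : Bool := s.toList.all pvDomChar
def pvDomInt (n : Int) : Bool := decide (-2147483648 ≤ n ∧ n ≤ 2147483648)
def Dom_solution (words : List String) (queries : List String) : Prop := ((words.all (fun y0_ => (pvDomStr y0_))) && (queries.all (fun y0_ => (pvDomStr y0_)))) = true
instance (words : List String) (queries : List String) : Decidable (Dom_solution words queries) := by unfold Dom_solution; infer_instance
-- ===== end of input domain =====

-- B replaces A's two mutable tries by a direct per-query scan of the word list (objective: simpler).

-- ===== PORT A =====
-- A's Node class: `lengths` is a defaultdict(int), `next` a dict of child nodes.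
-- The pointer structure is rendered as a mutual inductive (children as an explicit list).
mutual
inductive PVTrie : Type where
  | mk : PySem.Dict Int Int → PVChildren → PVTrie
inductive PVChildren : Type where
  | nil : PVChildren
  | cons : Char → PVTrie → PVChildren → PVChildren
end

def pvEmpty : PVTrie := .mk PySem.Dict.empty .nil

-- self.next.get(v)
def pvCFind : PVChildren → Char → Option PVTrie
  | .nil, _ => none
  | .cons c t rest, v => if c == v then some t else pvCFind rest v

-- self.next[v] = node (overwrite in place / append new key, Python dict semantics)
def pvCSet : PVChildren → Char → PVTrie → PVChildren
  | .nil, c, t => .cons c t .nil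
  | .cons c' t' rest, c, t => if c' == c then .cons c' t rest else .cons c' t' (pvCSet rest c t)

-- A's word loop: chained addNext calls.  Each visited node does lengths[n] += 1 and
-- descends into (or creates) the child for the current character; mutation along the
-- path becomes path-copying recursion over the word's characters.
def pvInsert : PVTrie → List Char → Int → PVTrie
  | t, [], _ => t
  | .mk ls ch, c :: rest, n =>
      let child := (pvCFind ch c).getD pvEmpty
      .mk (ls.modify n 0 (· + 1)) (pvCSet ch c (pvInsert child rest n))

-- A's query loop (flag/break logic): '?' → lengths[n]; missing child → 0; exhausted → 1.
def pvWalk : PVTrie → List Char → Int → Int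
  | _, [], _ => 1
  | .mk ls ch, q :: rest, n =>
      if q == '?' then ls.getD n 0
      else
        match pvCFind ch q with
        | none => 0
        | some t => pvWalk t rest n

def solution (words : List String) (queries : List String) : List Int :=
  -- A builds TrieS and TrieR in one loop over words, advancing both per character;
  -- the two components are independent: inserting word[n-1-i] for i = 0..n-1 inserts
  -- the reversed word, so the pair-fold below performs the same updates.
  let tries := words.foldl (fun (p : PVTrie × PVTrie) w =>
      let cs := w.toList
      (pvInsert p.1 cs (cs.length : Int), pvInsert p.2 cs.reverse (cs.length : Int)))
    (pvEmpty, pvEmpty)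
  queries.map (fun query =>
    match query.toList with
    | [] => 0   -- query[0] raises IndexError in Python; excluded by Pre_solution
    | c :: _ =>
      if c ≠ '?' then pvWalk tries.1 query.toList (query.toList.length : Int)
      else pvWalk tries.2 query.toList.reverse (query.toList.length : Int))

-- ===== PORT B =====
def pvAltAnswer (ws : List (List Char)) (q : List Char) : Int :=
  if '?' ∈ q then
    if q.headD '?' ≠ '?' then
      let p := q.takeWhile (fun c => c ≠ '?')
      ((ws.countP (fun w => decide (w.length = q.length ∧ p <+: w)) : Int))
    else
      let r := q.reverse
      let p := r.takeWhile (fun c => c ≠ '?')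
      ((ws.countP (fun w => decide (w.length = q.length ∧ p <+: w.reverse)) : Int))
  else if ws.any (fun w => q.isPrefixOf w) then 1 else 0

def solution_alt (words : List String) (queries : List String) : List Int :=
  let ws := words.map String.toList
  queries.map (fun q => pvAltAnswer ws q.toList)

-- ===== PRECONDITION & SPEC =====
-- Pre_ excludes inputs containing an empty query: A raises IndexError on query[0] there.
def Pre_solution (words : List String) (queries : List String) : Prop := ∀ q ∈ queries, q ≠ ""
instance (words : List String) (queries : List String) : Decidable (Pre_solution words queries) := by unfold Pre_solution; infer_instance

def pvWitness_solution : List String × List String := (["abc", "abd", "xy"], ["ab??", "?bc", "abc", "???"])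

-- A raises IndexError (query[0]) when some query is the empty string; B returns 1 there iff some word exists (every word has the empty prefix), 0 otherwise.
def Raises_solution (words : List String) (queries : List String) : Prop := "" ∈ queries
instance (words : List String) (queries : List String) : Decidable (Raises_solution words queries) := by unfold Raises_solution; infer_instance
def pvRaiseWitness_solution : List String × List String := (["a"], [""])
def pvRaiseWitnessOut_solution : List Int := [1]

def Spec_solution (words : List String) (queries : List String) (out : List Int) : Prop := out = solution_alt words queries
instance (words : List String) (queries : List String) (out : List Int) : Decidable (Spec_solution words queries out) := by unfold Spec_solution; infer_instance

-- ===== CLAIM (what is proved, stated in full; the proofs are below) =====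
def Claim_equal_solution : Prop := ∀ (words : List String) (queries : List String), Dom_solution words queries → Pre_solution words queries → Spec_solution words queries (solution words queries)
def Claim_raises_solution : Prop := (∀ (words : List String) (queries : List String), Dom_solution words queries → Raises_solution words queries → ¬ Pre_solution words queries) ∧ (Dom_solution (pvRaiseWitness_solution.1) (pvRaiseWitness_solution.2) ∧ Raises_solution (pvRaiseWitness_solution.1) (pvRaiseWitness_solution.2) ∧ solution_alt (pvRaiseWitness_solution.1) (pvRaiseWitness_solution.2) = pvRaiseWitnessOut_solution)

-- ===== LEMMAS AND PROOFS =====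

-- the empty trie answers 0 on every nonempty query
theorem pvWalk_empty (q : List Char) (n : Int) (h : q ≠ []) : pvWalk pvEmpty q n = 0 := by
  cases q with
  | nil => exact absurd rfl h
  | cons c rest =>
      by_cases hc : c = '?' <;>
        simp [pvWalk, pvEmpty, pvCFind, hc, PySem.Dict.getD_empty]

theorem pvCFind_pvCSet : ∀ (ch : PVChildren) (a c : Char) (t : PVTrie),
    pvCFind (pvCSet ch a t) c = if c = a then some t else pvCFind ch c
  | .nil, a, c, t => by
      by_cases h : c = a
      · subst h; simp [pvCSet, pvCFind]
      · simp [pvCSet, pvCFind, h, Ne.symm h]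
  | .cons c' t' rest, a, c, t => by
      have ih := pvCFind_pvCSet rest a c t
      by_cases h1 : c' = a
      · subst h1
        by_cases h2 : c = c'
        · subst h2; simp [pvCSet, pvCFind]
        · simp [pvCSet, pvCFind, h2, Ne.symm h2]
      · by_cases h2 : c' = c
        · subst h2; simp [pvCSet, pvCFind, h1]
        · simp [pvCSet, pvCFind, h1, h2, ih]

-- single insertion, query containing '?': the answer grows by the word's contribution
theorem pvWalk_pvInsert_wild (q : List Char) (hq : '?' ∈ q) :
    ∀ (t : PVTrie) (w : List Char) (m n : Int),
      pvWalk (pvInsert t w m) q n =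
        pvWalk t q n +
          (if q.takeWhile (fun c => c ≠ '?') <+: w ∧
              (q.takeWhile (fun c => c ≠ '?')).length < w.length ∧ m = n then 1 else 0) := by
  induction q with
  | nil => simp at hq
  | cons c rest ih =>
      intro t w m n
      by_cases hc : c = '?'
      · subst hc
        cases w with
        | nil => simp [pvInsert]
        | cons a w' =>
            cases t with
            | mk ls ch =>
                by_cases hm : n = m
                · subst hm
                  simp [pvInsert, pvWalk]
                · simp [pvInsert, pvWalk, PySem.Dict.getD_modify, hm, Ne.symm hm]
      · have hrest : '?' ∈ rest := by
          rcases List.mem_cons.mp hq with h | h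
          · exact absurd h.symm hc
          · exact h
        cases w with
        | nil => simp [pvInsert, hc]
        | cons a w' =>
            cases t with
            | mk ls ch =>
                by_cases hca : c = a
                · subst hca
                  cases hfind : pvCFind ch c with
                  | none =>
                      simp [pvInsert, pvWalk, hc, pvCFind_pvCSet,
                            hfind, ih hrest, pvWalk_empty rest n (List.ne_nil_of_mem hrest),
                            List.cons_prefix_cons]
                  | some t' =>
                      simp [pvInsert, pvWalk, hc, pvCFind_pvCSet,
                            hfind, ih hrest, List.cons_prefix_cons]
                · simp [pvInsert, pvWalk, hc, pvCFind_pvCSet, hca,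
                        List.cons_prefix_cons]

-- single insertion, no '?': the answer becomes 1 exactly when the query is a prefix of the word
theorem pvWalk_pvInsert_exact (q : List Char) (hq : '?' ∉ q) :
    ∀ (t : PVTrie) (w : List Char) (m n : Int),
      pvWalk (pvInsert t w m) q n = if q <+: w then 1 else pvWalk t q n := by
  induction q with
  | nil => intro t w m n; simp [pvWalk]
  | cons c rest ih =>
      intro t w m n
      have hc : c ≠ '?' := fun h => hq (h ▸ List.mem_cons_self)
      have hrest : '?' ∉ rest := fun h => hq (List.mem_cons_of_mem c h)
      cases w with
      | nil => simp [pvInsert]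
      | cons a w' =>
          cases t with
          | mk ls ch =>
              by_cases hca : c = a
              · subst hca
                by_cases hpre : rest <+: w'
                · cases hfind : pvCFind ch c with
                  | none =>
                      simp [pvInsert, pvWalk, hc, pvCFind_pvCSet, hfind, ih hrest,
                            List.cons_prefix_cons, hpre]
                  | some t' =>
                      simp [pvInsert, pvWalk, hc, pvCFind_pvCSet, hfind, ih hrest,
                            List.cons_prefix_cons, hpre]
                · have hne : rest ≠ [] := by
                    intro h; exact hpre (h ▸ List.nil_prefix)
                  cases hfind : pvCFind ch c with
                  | none =>
                      simp [pvInsert, pvWalk, hc, pvCFind_pvCSet, hfind, ih hrest,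
                            List.cons_prefix_cons, hpre, pvWalk_empty rest n hne]
                  | some t' =>
                      simp [pvInsert, pvWalk, hc, pvCFind_pvCSet, hfind, ih hrest,
                            List.cons_prefix_cons, hpre]
              · simp [pvInsert, pvWalk, hc, pvCFind_pvCSet, hca, List.cons_prefix_cons]

theorem pvWalk_fold_wild (ls : List (List Char)) (q : List Char) (n : Int) (hq : '?' ∈ q) (t : PVTrie) :
    pvWalk (ls.foldl (fun t w => pvInsert t w (w.length : Int)) t) q n =
      pvWalk t q n +
        (ls.countP (fun w => decide (q.takeWhile (fun c => c ≠ '?') <+: w ∧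
            (q.takeWhile (fun c => c ≠ '?')).length < w.length ∧ (w.length : Int) = n)) : Int) := by
  induction ls generalizing t with
  | nil => simp
  | cons w ws ih =>
      simp only [List.foldl_cons, List.countP_cons]
      rw [ih, pvWalk_pvInsert_wild q hq]
      by_cases hcond : q.takeWhile (fun c => c ≠ '?') <+: w ∧
          (q.takeWhile (fun c => c ≠ '?')).length < w.length ∧ (w.length : Int) = n <;>
        · simp [hcond]
          ring

theorem pvWalk_fold_exact (ls : List (List Char)) (q : List Char) (hq : '?' ∉ q) (n : Int) (t : PVTrie) :
    pvWalk (ls.foldl (fun t w => pvInsert t w (w.length : Int)) t) q n =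
      if ls.any (fun w => q.isPrefixOf w) then 1 else pvWalk t q n := by
  induction ls generalizing t with
  | nil => simp
  | cons w ws ih =>
      simp only [List.foldl_cons, List.any_cons]
      rw [ih, pvWalk_pvInsert_exact q hq]
      by_cases h1 : q <+: w <;> by_cases h2 : ws.any (fun w => q.isPrefixOf w) = true <;>
        simp [h1, h2, List.isPrefixOf_iff_prefix]

theorem pvFold_pair (words : List String) : ∀ (t1 t2 : PVTrie),
    words.foldl (fun (p : PVTrie × PVTrie) w =>
      let cs := w.toList
      (pvInsert p.1 cs (cs.length : Int), pvInsert p.2 cs.reverse (cs.length : Int))) (t1, t2)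
    = ((words.map String.toList).foldl (fun t w => pvInsert t w (w.length : Int)) t1,
       (words.map (fun s => s.toList.reverse)).foldl (fun t w => pvInsert t w (w.length : Int)) t2) := by
  induction words with
  | nil => intro t1 t2; rfl
  | cons w ws ih =>
      intro t1 t2
      simp only [List.foldl_cons, List.map_cons]
      rw [ih]
      simp

theorem pvTakeWhile_len_lt (l : List Char) (h : '?' ∈ l) :
    (l.takeWhile (fun c => c ≠ '?')).length < l.length := by
  have hpre : l.takeWhile (fun c => c ≠ '?') <+: l := List.takeWhile_prefix _
  rcases Nat.eq_or_lt_of_le hpre.length_le with he | hlt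
  · exfalso
    have heq : l.takeWhile (fun c => c ≠ '?') = l := hpre.eq_of_length he
    rw [← heq] at h
    have := List.mem_takeWhile_imp h
    simp at this
  · exact hlt

-- ===== VERDICT (by name: the statement is the Claim_ definition above) =====
theorem solution_spec : Claim_equal_solution := by
  intro words queries _ hpre
  unfold Spec_solution solution solution_alt
  rw [pvFold_pair]
  apply List.map_congr_left
  intro q hq
  have hqne : q ≠ "" := hpre q hq
  obtain ⟨c, rest, hl⟩ : ∃ c rest, q.toList = c :: rest := by
    cases h0 : q.toList with
    | nil => exact absurd (String.toList_eq_nil_iff.mp h0) hqne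
    | cons c rest => exact ⟨c, rest, rfl⟩
  rw [hl]
  by_cases hc : c = '?'
  · subst hc
    have hwq : '?' ∈ ('?' :: rest).reverse := by simp
    have hplen := pvTakeWhile_len_lt _ hwq
    simp only [ne_eq] at hplen
    simp only [ne_eq, not_true_eq_false, if_false]
    rw [pvWalk_fold_wild _ _ _ hwq, pvWalk_empty _ _ (by simp)]
    simp only [pvAltAnswer, List.mem_cons, true_or, if_true, List.headD_cons, ne_eq,
      not_true_eq_false, if_false, zero_add]
    rw [List.countP_map, List.countP_map]
    congr 1
    apply List.countP_congr
    intro s _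
    simp only [Function.comp_apply]
    simp only [decide_eq_true_eq]
    simp only [List.length_reverse]
    simp only [List.length_reverse] at hplen
    constructor
    · rintro ⟨h1, h2, h3⟩
      exact ⟨by exact_mod_cast h3, h1⟩
    · rintro ⟨h1, h2⟩
      exact ⟨h2, by omega, by exact_mod_cast h1⟩
  · simp only [ne_eq, hc, not_false_eq_true, if_true]
    by_cases hw : '?' ∈ c :: rest
    · have hplen := pvTakeWhile_len_lt _ hw
      simp only [ne_eq] at hplen
      rw [pvWalk_fold_wild _ _ _ hw, pvWalk_empty _ _ (List.cons_ne_nil c rest)]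
      simp only [pvAltAnswer, hw, if_true, List.headD_cons, ne_eq, hc,
        not_false_eq_true, zero_add]
      rw [List.countP_map, List.countP_map]
      congr 1
      apply List.countP_congr
      intro s _
      simp only [Function.comp_apply]
      simp only [decide_eq_true_eq]
      constructor
      · rintro ⟨h1, h2, h3⟩
        exact ⟨by exact_mod_cast h3, h1⟩
      · rintro ⟨h1, h2⟩
        exact ⟨h2, by omega, by exact_mod_cast h1⟩
    · rw [pvWalk_fold_exact _ _ hw, pvWalk_empty _ _ (List.cons_ne_nil c rest)]
      simp [pvAltAnswer, hw]

@[simp] theorem solution_raises : Claim_raises_solution := by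
  unfold Claim_raises_solution
  exact ⟨by intro w q _ hr hp; exact hp "" hr rfl, by decide⟩
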